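-- pv_equiv track=rewrite | github.com/addcolours/devotional | universal-robotic-formatter.py | format_content_for_php
-- ===== SOURCE A (Python) =====
-- def format_content_for_php(raw_content):
--     """Format content for PHP files to match exact source structure."""
--     lines = raw_content.split('\n')
--     formatted_paragraphs = []
--     current_paragraph = []
--
--     for line in lines:
--         line = line.strip()
--         if not line:
--             if current_paragraph:
--                 # Use <br> without slash to match source exactly
--                 formatted_paragraphs.append(f'<p>{"<br>".join(current_paragraph)}</p>')
--                 current_paragraph = []
--         else:
--             current_paragraph.append(line)
--
--     if current_paragraph:
--         # Use <br> without slash to match source exactly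
--         formatted_paragraphs.append(f'<p>{"<br>".join(current_paragraph)}</p>')
--
--     return '\n                        '.join(formatted_paragraphs)
-- ===== SOURCE B (Python) =====
-- def format_content_for_php(raw_content):
--     """Format content for PHP files to match exact source structure."""
--     lines = [l.strip() for l in raw_content.split('\n')]
--     paragraphs = []
--     i, n = 0, len(lines)
--     while i < n:
--         if lines[i]:
--             j = i
--             while j < n and lines[j]:
--                 j += 1
--             paragraphs.append('<p>' + '<br>'.join(lines[i:j]) + '</p>')
--             i = j
--         else:
--             i += 1
--     return '\n                        '.join(paragraphs)
-- ===== Notes on version B (the rewrite author's own statement) =====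
-- stated objective: alternative
-- what changed: Replaces A's accumulator-and-flush loop (current paragraph list flushed on blank lines and once more after the loop) by stripping all lines up front and extracting maximal non-empty runs with a two-pointer scan, so there is no mutable paragraph accumulator and no trailing flush.
import Mathlib
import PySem

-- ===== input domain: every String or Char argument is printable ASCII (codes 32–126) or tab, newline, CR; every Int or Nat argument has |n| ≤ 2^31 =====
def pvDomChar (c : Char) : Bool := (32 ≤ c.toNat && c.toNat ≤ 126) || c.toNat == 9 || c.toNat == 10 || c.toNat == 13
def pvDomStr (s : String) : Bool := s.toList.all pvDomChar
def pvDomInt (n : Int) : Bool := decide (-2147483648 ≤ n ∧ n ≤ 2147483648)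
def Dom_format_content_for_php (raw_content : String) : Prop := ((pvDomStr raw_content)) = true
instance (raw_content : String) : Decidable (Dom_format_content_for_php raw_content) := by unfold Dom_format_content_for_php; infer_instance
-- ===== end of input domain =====

-- B replaces A's accumulator-and-flush loop by stripping all lines first and extracting
-- maximal non-empty runs (alternative decomposition, same cost).

-- ===== PORT A =====
-- one loop step of A: strip the line, flush the current paragraph on a blank line, else append
def pvStepA (st : List String × List String) (line : String) : List String × List String :=
  let line := PySem.Str.strip line
  if line = "" then
    if st.2 = [] then st
    else (st.1 ++ ["<p>" ++ PySem.Str.join "<br>" st.2 ++ "</p>"], [])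
  else (st.1, st.2 ++ [line])

def format_content_for_php (raw_content : String) : String :=
  let lines := (PySem.Str.split? raw_content "\n").getD []
  let st := lines.foldl pvStepA ([], [])
  let paras :=
    if st.2 = [] then st.1
    else st.1 ++ ["<p>" ++ PySem.Str.join "<br>" st.2 ++ "</p>"]
  PySem.Str.join "\n                        " paras

-- ===== PORT B =====
-- B's inner while-loop scans the maximal run of non-empty lines (takeWhile) and resumes
-- after it (dropWhile); lines[i:j] is that run.
def pvRuns : List String → List String
  | [] => []
  | l :: ls =>
    if h : l = "" then pvRuns ls
    else
      ("<p>" ++ PySem.Str.join "<br>" ((l :: ls).takeWhile (· ≠ "")) ++ "</p>") ::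
        pvRuns ((l :: ls).dropWhile (· ≠ ""))
termination_by ls => ls.length
decreasing_by
  · simp
  · have h2 : List.dropWhile (fun x => decide (x ≠ "")) (l :: ls)
        = List.dropWhile (fun x => decide (x ≠ "")) ls := by
      rw [List.dropWhile_cons]; simp [h]
    have h3 := List.length_dropWhile_le (fun x => decide (x ≠ "")) ls
    simp only [ne_eq, decide_not] at h2 h3 ⊢
    simp only [h2]
    simp
    omega

def format_content_for_php_alt (raw_content : String) : String :=
  let lines := ((PySem.Str.split? raw_content "\n").getD []).map PySem.Str.strip
  PySem.Str.join "\n                        " (pvRuns lines)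

-- ===== PRECONDITION & SPEC =====
def Spec_format_content_for_php (raw_content : String) (out : String) : Prop := out = format_content_for_php_alt raw_content
instance (raw_content : String) (out : String) : Decidable (Spec_format_content_for_php raw_content out) := by unfold Spec_format_content_for_php; infer_instance

-- ===== CLAIM (what is proved, stated in full; the proofs are below) =====
def Claim_equal_format_content_for_php : Prop := ∀ (raw_content : String), Dom_format_content_for_php raw_content → Spec_format_content_for_php raw_content (format_content_for_php raw_content)

-- ===== LEMMAS AND PROOFS =====

-- the paragraphs A will still emit, given the pending paragraph `cur` and remaining stripped lines
def pvCont (cur : List String) : List String → List String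
  | [] => if cur = [] then [] else ["<p>" ++ PySem.Str.join "<br>" cur ++ "</p>"]
  | l :: ls =>
    if l = "" then
      (if cur = [] then [] else ["<p>" ++ PySem.Str.join "<br>" cur ++ "</p>"]) ++ pvCont [] ls
    else pvCont (cur ++ [l]) ls

theorem pvCont_eq_runs (ls : List String) :
    pvCont [] ls = pvRuns ls ∧
    ∀ cur, cur ≠ [] →
      pvCont cur ls =
        ("<p>" ++ PySem.Str.join "<br>" (cur ++ ls.takeWhile (· ≠ "")) ++ "</p>") ::
          pvRuns (ls.dropWhile (· ≠ "")) := by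
  induction ls with
  | nil =>
    refine ⟨by simp [pvCont, pvRuns], ?_⟩
    intro cur h
    simp [pvCont, pvRuns, h]
  | cons l ls ih =>
    obtain ⟨ih1, ih2⟩ := ih
    by_cases hl : l = ""
    · subst hl
      refine ⟨?_, ?_⟩
      · simp [pvCont, pvRuns, ih1]
      · intro cur h
        simp [pvCont, pvRuns, h, ih1, List.dropWhile]
    · refine ⟨?_, ?_⟩
      · rw [pvRuns]
        simp only [pvCont, if_neg hl, List.nil_append, dif_neg hl]
        rw [ih2 [l] (by simp)]
        simp [List.takeWhile, List.dropWhile, hl]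
      · intro cur h
        simp only [pvCont, if_neg hl]
        rw [ih2 (cur ++ [l]) (by simp)]
        simp [List.takeWhile, List.dropWhile, hl]

-- A's final flush
def pvFinish (st : List String × List String) : List String :=
  if st.2 = [] then st.1
  else st.1 ++ ["<p>" ++ PySem.Str.join "<br>" st.2 ++ "</p>"]

-- the value A's fold-plus-final-flush produces, as pvCont over the stripped remaining lines
theorem pvFold_eq_cont (ls : List String) (paras cur : List String) :
    pvFinish (ls.foldl pvStepA (paras, cur)) =
    paras ++ pvCont cur (ls.map PySem.Str.strip) := by
  induction ls generalizing paras cur with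
  | nil => simp only [List.foldl_nil, List.map_nil, pvCont, pvFinish]; split <;> simp_all
  | cons l ls ih =>
    simp only [List.foldl_cons, List.map_cons]
    by_cases hl : PySem.Str.strip l = ""
    · by_cases hc : cur = []
      · subst hc
        rw [show pvStepA (paras, []) l = (paras, []) by simp [pvStepA, hl]]
        rw [ih]
        simp [pvCont, hl]
      · rw [show pvStepA (paras, cur) l
              = (paras ++ ["<p>" ++ PySem.Str.join "<br>" cur ++ "</p>"], []) by
            simp [pvStepA, hl, hc]]
        rw [ih]
        simp [pvCont, hl, hc]
    · rw [show pvStepA (paras, cur) l = (paras, cur ++ [PySem.Str.strip l]) by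
            simp [pvStepA, hl]]
      rw [ih]
      simp [pvCont, hl]

-- ===== VERDICT (by name: the statement is the Claim_ definition above) =====
theorem format_content_for_php_spec : Claim_equal_format_content_for_php := by
  intro raw _
  show _ = _
  unfold format_content_for_php format_content_for_php_alt
  have h := pvFold_eq_cont ((PySem.Str.split? raw "\n").getD []) [] []
  rw [(pvCont_eq_runs _).1] at h
  simp only [pvFinish, List.nil_append] at h
  exact congrArg (PySem.Str.join "\n                        ") h
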